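-- pv_equiv track=rewrite | github.com/sidkid78/ukfv4 | backend/core/layers/layer4.py | _identify_blind_spots
-- ===== SOURCE A (Python) =====
-- from typing import Dict, Any, List, Optional
--
-- def _identify_blind_spots(pov_analyses: List[Dict[str, Any]]) -> List[str]:
--     """Identify potential blind spots not covered by any perspective"""
--
--     # Common blind spots to check for
--     potential_blind_spots = [
--         "long_term_consequences",
--         "unintended_effects",
--         "minority_perspectives",
--         "international_implications",
--         "technical_limitations",
--         "ethical_implications",
--         "environmental_impact",
--         "social_equity"
--     ]
--
--     # Check which concerns are covered
--     covered_concerns = set()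
--     for analysis in pov_analyses:
--         covered_concerns.update(analysis.get("concerns", []))
--
--     # Identify uncovered areas
--     blind_spots = []
--     for blind_spot in potential_blind_spots:
--         if not any(concern in blind_spot or blind_spot in concern
--                   for concern in covered_concerns):
--             blind_spots.append(blind_spot)
--
--     return blind_spots
-- ===== SOURCE B (Python) =====
-- from typing import Dict, Any, List
--
-- def _identify_blind_spots(pov_analyses: List[Dict[str, Any]]) -> List[str]:
--     """Identify potential blind spots not covered by any perspective."""
--     potential_blind_spots = [
--         "long_term_consequences",
--         "unintended_effects",
--         "minority_perspectives",
--         "international_implications",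
--         "technical_limitations",
--         "ethical_implications",
--         "environmental_impact",
--         "social_equity",
--     ]
--
--     # Stream over the analyses, shrinking the candidate list per concern;
--     # no covered-concern set is ever built.
--     remaining = list(potential_blind_spots)
--     for analysis in pov_analyses:
--         for concern in analysis.get("concerns", []):
--             remaining = [bs for bs in remaining
--                          if concern not in bs and bs not in concern]
--         if not remaining:
--             return []
--     return remaining
-- ===== Notes on version B (the rewrite author's own statement) =====
-- stated objective: alternative
-- what changed: A first accumulates every concern into a covered set and then tests each blind spot against that whole set; B never builds any set: it streams over the analyses, shrinking a candidate blind-spot list in place per concern, and stops early when no candidates remain.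
import Mathlib
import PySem

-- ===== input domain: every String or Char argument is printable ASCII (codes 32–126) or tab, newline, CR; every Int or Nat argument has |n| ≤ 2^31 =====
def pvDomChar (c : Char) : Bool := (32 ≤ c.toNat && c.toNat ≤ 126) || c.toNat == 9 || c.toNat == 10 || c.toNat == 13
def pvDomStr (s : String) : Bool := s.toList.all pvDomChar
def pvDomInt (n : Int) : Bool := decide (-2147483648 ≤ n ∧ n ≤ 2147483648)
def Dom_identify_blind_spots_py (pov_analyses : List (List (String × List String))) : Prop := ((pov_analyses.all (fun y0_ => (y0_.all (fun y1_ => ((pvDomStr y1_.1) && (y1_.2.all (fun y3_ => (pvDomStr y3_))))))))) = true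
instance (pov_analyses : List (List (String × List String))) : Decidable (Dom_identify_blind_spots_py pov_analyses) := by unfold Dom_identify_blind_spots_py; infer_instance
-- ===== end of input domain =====

-- B replaces A's covered-concern set plus per-blind-spot rescan by a streaming pass that
-- shrinks a candidate blind-spot list per concern, with an early exit (objective: alternative).

-- the module-level constant list both versions share
def pvPotentialBlindSpots : List String :=
  ["long_term_consequences", "unintended_effects", "minority_perspectives",
   "international_implications", "technical_limitations", "ethical_implications",
   "environmental_impact", "social_equity"]

-- ===== PORT A =====
def identify_blind_spots_py (pov_analyses : List (List (String × List String))) : List String :=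
  let covered_concerns : PySem.Set String :=
    pov_analyses.foldl
      (fun s analysis => PySem.Set.update s (PySem.Dict.getD (PySem.Dict.mk analysis) "concerns" []))
      PySem.Set.empty
  pvPotentialBlindSpots.foldl
    (fun blind_spots blind_spot =>
      if !(covered_concerns.any (fun concern =>
            PySem.Str.isIn concern blind_spot || PySem.Str.isIn blind_spot concern))
      then blind_spots ++ [blind_spot] else blind_spots) []

-- ===== PORT B =====
-- inner loop: 'for concern in analysis.get("concerns", []): remaining = [bs for bs in remaining if …]'
def pvShrink (concerns : List String) (remaining : List String) : List String :=
  concerns.foldl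
    (fun rem concern =>
      rem.filter (fun bs => !(PySem.Str.isIn concern bs) && !(PySem.Str.isIn bs concern)))
    remaining

-- outer loop with the early 'return []' when the candidate list is exhausted
def pvGo : List (List (String × List String)) → List String → List String
  | [], remaining => remaining
  | analysis :: rest, remaining =>
    let remaining' := pvShrink (PySem.Dict.getD (PySem.Dict.mk analysis) "concerns" []) remaining
    if remaining' = [] then [] else pvGo rest remaining'

def identify_blind_spots_py_alt (pov_analyses : List (List (String × List String))) : List String :=
  pvGo pov_analyses pvPotentialBlindSpots

-- ===== PRECONDITION & SPEC =====
def Spec_identify_blind_spots_py (pov_analyses : List (List (String × List String))) (out : List String) : Prop := out = identify_blind_spots_py_alt pov_analyses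
instance (pov_analyses : List (List (String × List String))) (out : List String) : Decidable (Spec_identify_blind_spots_py pov_analyses out) := by unfold Spec_identify_blind_spots_py; infer_instance

-- ===== CLAIM (what is proved, stated in full; the proofs are below) =====
def Claim_equal_identify_blind_spots_py : Prop := ∀ (pov_analyses : List (List (String × List String))), Dom_identify_blind_spots_py pov_analyses → Spec_identify_blind_spots_py pov_analyses (identify_blind_spots_py pov_analyses)

-- ===== LEMMAS AND PROOFS =====

-- all concerns of the analyses, in order (duplicates kept; the overlap test is idempotent)
def pvConcerns (pov_analyses : List (List (String × List String))) : List String :=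
  pov_analyses.flatMap (fun a => PySem.Dict.getD (PySem.Dict.mk a) "concerns" [])

-- the survival predicate: no concern of l overlaps bs
def pvFree (l : List String) (bs : String) : Bool :=
  l.all (fun c => !(PySem.Str.isIn c bs) && !(PySem.Str.isIn bs c))

theorem pvShrink_eq_filter (l : List String) (rem : List String) :
    pvShrink l rem = rem.filter (pvFree l) := by
  induction l generalizing rem with
  | nil =>
    rw [show pvFree [] = (fun _ => true) from rfl, List.filter_true]
    rfl
  | cons hd tl ih =>
    simp only [pvShrink, List.foldl_cons] at *
    rw [ih, List.filter_filter]
    apply List.filter_congr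
    intro bs _
    simp [pvFree, Bool.and_comm]

theorem pvGo_eq_filter (pov : List (List (String × List String))) (rem : List String) :
    pvGo pov rem = rem.filter (pvFree (pvConcerns pov)) := by
  induction pov generalizing rem with
  | nil =>
    rw [show pvFree (pvConcerns []) = (fun _ => true) from rfl, List.filter_true]
    rfl
  | cons hd tl ih =>
    simp only [pvGo, pvShrink_eq_filter]
    have hsplit : rem.filter (pvFree (pvConcerns (hd :: tl)))
        = (rem.filter (pvFree (PySem.Dict.getD (PySem.Dict.mk hd) "concerns" []))).filter
            (pvFree (pvConcerns tl)) := by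
      rw [List.filter_filter]
      apply List.filter_congr
      intro bs _
      simp [pvConcerns, pvFree, List.all_append, Bool.and_comm]
    by_cases h : rem.filter (pvFree (PySem.Dict.getD (PySem.Dict.mk hd) "concerns" [])) = []
    · rw [if_pos h, hsplit, h, List.filter_nil]
    · rw [if_neg h, ih, hsplit]

-- membership in A's covered-concerns set = membership in the concatenated concern lists
theorem pv_mem_covered (pov : List (List (String × List String)))
    (s : PySem.Set String) (x : String) :
    x ∈ pov.foldl
        (fun s analysis => PySem.Set.update s (PySem.Dict.getD (PySem.Dict.mk analysis) "concerns" []))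
        s
    ↔ x ∈ s ∨ x ∈ pvConcerns pov := by
  induction pov generalizing s with
  | nil => simp [pvConcerns]
  | cons hd tl ih =>
    simp only [List.foldl_cons]
    rw [ih]
    simp [PySem.Set.mem_update, pvConcerns, or_assoc]

-- ===== VERDICT (by name: the statement is the Claim_ definition above) =====
theorem identify_blind_spots_py_spec : Claim_equal_identify_blind_spots_py := by
  intro pov _
  unfold Spec_identify_blind_spots_py identify_blind_spots_py identify_blind_spots_py_alt
  rw [PySem.List.foldl_append_if_eq_filter, List.nil_append, pvGo_eq_filter]
  apply List.filter_congr
  intro bs _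
  apply Bool.eq_iff_iff.mpr
  rw [Bool.not_eq_eq_eq_not, Bool.not_true, List.any_eq_false]
  unfold pvFree
  rw [List.all_eq_true]
  constructor
  · intro h c hc
    have := h c ((pv_mem_covered pov PySem.Set.empty c).mpr (by simp [PySem.Set.empty, hc]))
    simpa using this
  · intro h c hc
    rcases (pv_mem_covered pov PySem.Set.empty c).mp hc with h0 | h1
    · simp [PySem.Set.empty] at h0
    · simpa using h c h1
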